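-- pv_equiv track=rewrite | github.com/lovelyfrog/cs61A | projects/cats/typing.py | swap_diff
-- ===== SOURCE A (Python) =====
-- def swap_diff(start, goal, limit):
--     """A diff function for autocorrect that determines how many letters
--     in START need to be substituted to create GOAL, then adds the difference in
--     their lengths.
--     """
--     # BEGIN PROBLEM 6
--     # assert False, 'Remove this line'
--     if limit >= 0:
--         if (start != '') and (goal != ''):
--             if start[0] == goal[0]:
--                 return swap_diff(start[1:], goal[1:], limit)
--             else:
--                 return 1 + swap_diff(start[1:], goal[1:], limit-1)
--         else:
--             diff_goal_start = abs(len(goal) - len(start))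
--             if  diff_goal_start > limit:
--                 return limit + 1
--             else:
--                 return diff_goal_start
--     else:
--         return 0
-- ===== SOURCE B (Python) =====
-- def swap_diff(start, goal, limit):
--     if limit < 0:
--         return 0
--     m = sum(a != b for a, b in zip(start, goal))
--     d = abs(len(start) - len(goal))
--     return min(m + d, limit + 1)
-- ===== Notes on version B (the rewrite author's own statement) =====
-- stated objective: simpler
-- what changed: Replaces A's position-by-position recursion that decrements the budget and caps along the way with a single zip pass counting all mismatches plus the closed form min(m + length-diff, limit + 1).
import Mathlib
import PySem

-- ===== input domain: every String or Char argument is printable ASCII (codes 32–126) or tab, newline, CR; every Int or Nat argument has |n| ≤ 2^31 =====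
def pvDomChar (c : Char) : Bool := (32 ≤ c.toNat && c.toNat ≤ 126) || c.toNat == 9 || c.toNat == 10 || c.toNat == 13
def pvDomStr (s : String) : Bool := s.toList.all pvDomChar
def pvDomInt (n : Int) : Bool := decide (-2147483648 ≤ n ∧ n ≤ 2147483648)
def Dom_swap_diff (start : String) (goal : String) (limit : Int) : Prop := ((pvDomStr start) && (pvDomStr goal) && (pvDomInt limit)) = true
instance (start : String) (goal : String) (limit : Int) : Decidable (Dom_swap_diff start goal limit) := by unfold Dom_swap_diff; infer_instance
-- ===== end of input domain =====

-- B replaces A's budget-decrementing recursion with one mismatch count and a closed-form min (objective: simpler).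

-- ===== PORT A =====
-- literal transliteration of A's recursion over the characters
def swapDiffRec (s g : List Char) (limit : Int) : Int :=
  if limit ≥ 0 then
    match s, g with
    | a :: s', b :: g' =>
      if a == b then swapDiffRec s' g' limit
      else 1 + swapDiffRec s' g' (limit - 1)
    | s', g' =>
      let d : Int := |(g'.length : Int) - (s'.length : Int)|
      if d > limit then limit + 1 else d
  else 0
termination_by s.length

def swap_diff (start : String) (goal : String) (limit : Int) : Int :=
  swapDiffRec start.toList goal.toList limit

-- ===== PORT B =====
def swap_diff_alt (start : String) (goal : String) (limit : Int) : Int :=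
  if limit < 0 then 0
  else
    let m : Int := (start.toList.zip goal.toList).foldl
      (fun acc p => acc + (if p.1 ≠ p.2 then 1 else 0)) 0
    let d : Int := |(start.toList.length : Int) - (goal.toList.length : Int)|
    min (m + d) (limit + 1)

-- ===== PRECONDITION & SPEC =====
def Spec_swap_diff (start : String) (goal : String) (limit : Int) (out : Int) : Prop := out = swap_diff_alt start goal limit
instance (start : String) (goal : String) (limit : Int) (out : Int) : Decidable (Spec_swap_diff start goal limit out) := by unfold Spec_swap_diff; infer_instance

-- ===== CLAIM (what is proved, stated in full; the proofs are below) =====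
def Claim_equal_swap_diff : Prop := ∀ (start : String) (goal : String) (limit : Int), Dom_swap_diff start goal limit → Spec_swap_diff start goal limit (swap_diff start goal limit)

-- ===== LEMMAS AND PROOFS =====

-- mismatch count of the common prefix
def misCount : List Char → List Char → Int
  | a :: s, b :: g => (if a = b then 0 else 1) + misCount s g
  | _, _ => 0

theorem misCount_nonneg : ∀ (s g : List Char), 0 ≤ misCount s g
  | a :: s, b :: g => by
    have := misCount_nonneg s g
    simp only [misCount]; split_ifs <;> omega
  | [], g => by simp [misCount]
  | _ :: _, [] => by simp [misCount]

-- A's cap equals min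
theorem capEq (d limit : Int) : (if d > limit then limit + 1 else d) = min d (limit + 1) := by
  rw [min_def]; split_ifs <;> omega

theorem absLenCons (a b : Char) (s g : List Char) :
    |((a :: s).length : Int) - ((b :: g).length : Int)| = |(s.length : Int) - (g.length : Int)| := by
  have h : ((a :: s).length : Int) - ((b :: g).length : Int) = (s.length : Int) - (g.length : Int) := by
    simp [List.length_cons]
  rw [h]

-- A's recursion equals B's closed form for limit ≥ 0
theorem swapDiffRec_eq : ∀ (s g : List Char) (limit : Int), 0 ≤ limit →
    swapDiffRec s g limit = min (misCount s g + |(s.length : Int) - (g.length : Int)|) (limit + 1)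
  | [], g, limit, h => by
    rw [swapDiffRec.eq_def]
    simp only [if_pos (by omega : limit ≥ 0)]
    cases g with
    | nil => simp [misCount, capEq]
    | cons b g' =>
      simp only [misCount, capEq]
      have habs : |((b :: g').length : Int) - (([] : List Char).length : Int)|
          = |(([] : List Char).length : Int) - ((b :: g').length : Int)| := abs_sub_comm _ _
      rw [habs]
      ring_nf
  | a :: s, [], limit, h => by
    rw [swapDiffRec.eq_def]
    simp only [if_pos (by omega : limit ≥ 0)]
    simp only [misCount, capEq]
    have habs : |(([] : List Char).length : Int) - ((a :: s).length : Int)|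
        = |((a :: s).length : Int) - (([] : List Char).length : Int)| := abs_sub_comm _ _
    rw [habs]
    ring_nf
  | a :: s, b :: g, limit, h => by
    rw [swapDiffRec.eq_def]
    simp only [if_pos (by omega : limit ≥ 0)]
    rw [absLenCons]
    by_cases hab : a = b
    · have ih := swapDiffRec_eq s g limit h
      simp only [hab, beq_self_eq_true, if_true, ih, misCount]
      ring_nf
    · have hab' : (a == b) = false := by simp [hab]
      simp only [hab', if_neg hab, Bool.false_eq_true, if_false, misCount]
      have hm := misCount_nonneg s g
      have hd : 0 ≤ |(s.length : Int) - (g.length : Int)| := abs_nonneg _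
      by_cases hl : 0 ≤ limit - 1
      · have ih := swapDiffRec_eq s g (limit - 1) hl
        rw [ih]
        omega
      · have hz : swapDiffRec s g (limit - 1) = 0 := by
          rw [swapDiffRec.eq_def]
          simp only [if_neg (by omega : ¬ limit - 1 ≥ 0)]
        rw [hz]
        omega

-- B's zip fold equals misCount
theorem zipFold_eq : ∀ (s g : List Char) (c : Int),
    (s.zip g).foldl (fun acc p => acc + (if p.1 ≠ p.2 then 1 else 0)) c = c + misCount s g
  | [], g, c => by cases g <;> simp [misCount]
  | _ :: _, [], c => by simp [misCount]
  | a :: s, b :: g, c => by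
    simp only [List.zip_cons_cons, List.foldl_cons, misCount, zipFold_eq s g]
    by_cases hab : a = b
    · simp [hab]
    · simp [hab]
      ring

-- ===== VERDICT (by name: the statement is the Claim_ definition above) =====
theorem swap_diff_spec : Claim_equal_swap_diff := by
  intro start goal limit _
  unfold Spec_swap_diff swap_diff swap_diff_alt
  by_cases h : limit < 0
  · simp only [if_pos h]
    rw [swapDiffRec.eq_def]
    simp only [if_neg (by omega : ¬ limit ≥ 0)]
  · simp only [if_neg h]
    rw [swapDiffRec_eq _ _ _ (by omega)]
    rw [zipFold_eq]
    ring_nf
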